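-- pv_equiv track=rewrite | github.com/alexacanaan23/COSC101 | hw05_starter (1)/hw05_reformat.py | check_and_list
-- ===== SOURCE A (Python) =====
-- def check_and_list(data):
--     'accepts a given string of data'
--     'checks the format of a given string to see if it matches below'
--     'name1 data1 name2 data2 name3 data3'
--     'there can be any number of pairs of names and data; names do not have to be unique'
--     'returns True if format is correct and a list containing each name followed by its associated data point'
--     'returns False if format is incorrect and an empty list'
--
--     returnlist = []
--     newdata = data.split()
--
--     for item in range(1, len(newdata)):                 #checks the format of given string
--         if newdata[item].isdigit() == True:             #checks that there are not two consecutive integer objects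
--             if newdata[item - 1].isdigit() == True:
--                 return False, returnlist
--
--     previousdigit = 0
--     for index in range(len(newdata)):                   #for each object in the formatted list
--         if newdata[index].isdigit() == True:            #if the index is a digit, concatenate the strings and add them to returnlist, then add the data
--             returnlist += [' '.join(newdata[previousdigit:index])]
--             returnlist += [newdata[index]]
--             previousdigit = index + 1
--
--     return True, returnlist
-- ===== SOURCE B (Python) =====
-- def check_and_list(data):
--     'single fused pass: validate consecutive-digit rule and build the pairs list together'
--     result = []
--     name_buffer = []
--     prev_was_digit = False
--     for token in data.split():
--         if token.isdigit():
--             if prev_was_digit: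
--                 return False, []
--             result.append(' '.join(name_buffer))
--             result.append(token)
--             name_buffer = []
--             prev_was_digit = True
--         else:
--             name_buffer.append(token)
--             prev_was_digit = False
--     return True, result
-- ===== Notes on version B (the rewrite author's own statement) =====
-- stated objective: simpler
-- what changed: Replaces A's two separate index-based scans (an adjacency check with slicing-based rebuild) by one structural pass over the tokens that maintains a name buffer and a previous-was-digit flag, validating and building simultaneously.
import Mathlib
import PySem

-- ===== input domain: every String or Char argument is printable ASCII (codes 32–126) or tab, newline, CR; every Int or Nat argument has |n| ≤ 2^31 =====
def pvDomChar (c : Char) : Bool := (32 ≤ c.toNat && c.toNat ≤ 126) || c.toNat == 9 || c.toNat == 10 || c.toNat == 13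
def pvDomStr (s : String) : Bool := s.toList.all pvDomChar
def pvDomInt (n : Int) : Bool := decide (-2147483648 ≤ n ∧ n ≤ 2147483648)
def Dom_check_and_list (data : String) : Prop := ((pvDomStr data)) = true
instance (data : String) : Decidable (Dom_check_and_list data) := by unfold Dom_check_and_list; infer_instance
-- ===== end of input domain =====

-- B fuses A's two index-based scans into one structural pass over the tokens (simpler decomposition; return value only).

-- ===== PORT A =====
-- first loop: for item in range(1, len(newdata)): early-return False on two consecutive digit tokens
def aLoop1 (nd : List String) : List Int → Bool
  | [] => false
  | i :: rest =>
    if PySem.Str.strIsdigit (PySem.List.pyGetD nd i "") then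
      if PySem.Str.strIsdigit (PySem.List.pyGetD nd (i - 1) "") then true
      else aLoop1 nd rest
    else aLoop1 nd rest

-- second loop: for index in range(len(newdata)) with previousdigit and returnlist
def aLoop2 (nd : List String) : List Int → Int → List String → List String
  | [], _, acc => acc
  | i :: rest, prev, acc =>
    if PySem.Str.strIsdigit (PySem.List.pyGetD nd i "") then
      aLoop2 nd rest (i + 1)
        (acc ++ [PySem.Str.join " " (PySem.List.slice nd (some prev) (some i))] ++ [PySem.List.pyGetD nd i ""])
    else aLoop2 nd rest prev acc

def check_and_list (data : String) : Bool × List String :=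
  let newdata := PySem.Str.split₀ data
  if aLoop1 newdata (PySem.List.pyRange 1 newdata.length 1) then (false, [])
  else (true, aLoop2 newdata (PySem.List.pyRange 0 newdata.length 1) 0 [])

-- ===== PORT B =====
-- single pass: name buffer + previous-was-digit flag; none = the early 'return False, []'
def bGo : List String → List String → Bool → List String → Option (List String)
  | [], _, _, acc => some acc
  | t :: rest, buf, prev, acc =>
    if PySem.Str.strIsdigit t then
      if prev then none
      else bGo rest [] true (acc ++ [PySem.Str.join " " buf, t])
    else bGo rest (buf ++ [t]) false acc

def check_and_list_alt (data : String) : Bool × List String :=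
  match bGo (PySem.Str.split₀ data) [] false [] with
  | none => (false, [])
  | some r => (true, r)

-- ===== PRECONDITION & SPEC =====
def Spec_check_and_list (data : String) (out : Bool × List String) : Prop := out = check_and_list_alt data
instance (data : String) (out : Bool × List String) : Decidable (Spec_check_and_list data out) := by unfold Spec_check_and_list; infer_instance

-- ===== CLAIM (what is proved, stated in full; the proofs are below) =====
def Claim_equal_check_and_list : Prop := ∀ (data : String), Dom_check_and_list data → Spec_check_and_list data (check_and_list data)

-- ===== LEMMAS AND PROOFS =====

-- "some pair of consecutive tokens, the earlier one's digit-ness being p, are both digits"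
def badFrom (p : Bool) : List String → Bool
  | [] => false
  | t :: rest => (p && PySem.Str.strIsdigit t) || badFrom (PySem.Str.strIsdigit t) rest

-- structural form of A's second loop
def build : List String → List String → List String → List String
  | [], _, acc => acc
  | t :: rest, buf, acc =>
    if PySem.Str.strIsdigit t then build rest [] (acc ++ [PySem.Str.join " " buf, t])
    else build rest (buf ++ [t]) acc

theorem bGo_eq (nd : List String) : ∀ (buf : List String) (prev : Bool) (acc : List String),
    bGo nd buf prev acc = if badFrom prev nd then none else some (build nd buf acc) := by
  induction nd with
  | nil => intro buf prev acc; simp [bGo, badFrom, build]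
  | cons t rest ih =>
    intro buf prev acc
    simp only [bGo, badFrom, build, PySem.Str.strIsdigit_eq]
    by_cases hd : PySem.Chars.strIsdigit t.toList
    · cases prev <;> simp [hd, ih]
    · simp [hd, ih]

theorem aLoop1_eq (nd : List String) : ∀ (k : Nat), 1 ≤ k → k ≤ nd.length →
    aLoop1 nd (PySem.List.pyRange (k : Int) nd.length 1)
      = badFrom (PySem.Str.strIsdigit (nd.getD (k - 1) "")) (nd.drop k) := by
  intro k h1 h2
  induction hlen : nd.length - k generalizing k with
  | zero =>
    have hk : k = nd.length := by omega
    rw [PySem.List.pyRange_one_eq_nil (by omega)]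
    simp [aLoop1, hk, badFrom]
  | succ m ih =>
    have hk : k < nd.length := by omega
    rw [PySem.List.pyRange_one_cons (by exact_mod_cast hk)]
    have hdrop : nd.drop k = nd[k] :: nd.drop (k + 1) := List.drop_eq_getElem_cons hk
    have hget : PySem.List.pyGetD nd (k : Int) "" = nd[k] := by
      rw [PySem.List.pyGetD_natCast]; simp [List.getD, hk]
    have hget' : PySem.List.pyGetD nd ((k : Int) - 1) "" = nd.getD (k - 1) "" := by
      have : (k : Int) - 1 = ((k - 1 : Nat) : Int) := by omega
      rw [this, PySem.List.pyGetD_natCast]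
    rw [hdrop]
    simp only [aLoop1, badFrom, hget, hget', PySem.Str.strIsdigit_eq]
    have hcast : (k : Int) + 1 = ((k + 1 : Nat) : Int) := by push_cast; ring
    have hnext : nd.getD (k + 1 - 1) "" = nd[k] := by simp [List.getD, hk]
    have htail : aLoop1 nd (PySem.List.pyRange ((k : Int) + 1) nd.length 1)
        = badFrom (PySem.Chars.strIsdigit nd[k].toList) (nd.drop (k + 1)) := by
      rw [hcast, ih (k + 1) (by omega) (by omega) (by omega), hnext, PySem.Str.strIsdigit_eq]
    by_cases ha : PySem.Chars.strIsdigit nd[k].toList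
    · simp [ha, htail]
    · simp [ha, htail]

theorem slice_snoc (nd : List String) (p k : Nat) (hp : p ≤ k) (hk : k < nd.length) :
    PySem.List.slice nd (some (p : Int)) (some ((k : Int) + 1))
      = PySem.List.slice nd (some (p : Int)) (some (k : Int)) ++ [nd[k]] := by
  have h1 : ((k : Int) + 1) = ((k + 1 : Nat) : Int) := by push_cast; ring
  rw [h1, PySem.List.slice_natCast, PySem.List.slice_natCast]
  have h2 : k + 1 - p = (k - p) + 1 := by omega
  rw [h2, List.take_add_one]
  have h3 : (nd.drop p)[k - p]? = some nd[k] := by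
    rw [List.getElem?_drop]
    have : p + (k - p) = k := by omega
    rw [this, List.getElem?_eq_getElem hk]
  simp [h3]

theorem aLoop2_eq (nd : List String) : ∀ (k p : Nat) (acc : List String), p ≤ k → k ≤ nd.length →
    aLoop2 nd (PySem.List.pyRange (k : Int) nd.length 1) (p : Int) acc
      = build (nd.drop k) (PySem.List.slice nd (some (p : Int)) (some (k : Int))) acc := by
  intro k p acc hp hk
  induction hlen : nd.length - k generalizing k p acc with
  | zero =>
    have : k = nd.length := by omega
    rw [PySem.List.pyRange_one_eq_nil (by omega)]
    simp [aLoop2, this, build]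
  | succ m ih =>
    have hklt : k < nd.length := by omega
    rw [PySem.List.pyRange_one_cons (by exact_mod_cast hklt)]
    have hdrop : nd.drop k = nd[k] :: nd.drop (k + 1) := List.drop_eq_getElem_cons hklt
    have hget : PySem.List.pyGetD nd (k : Int) "" = nd[k] := by
      rw [PySem.List.pyGetD_natCast]; simp [List.getD, hklt]
    rw [hdrop]
    simp only [aLoop2, build, hget, PySem.Str.strIsdigit_eq]
    have hcast : (k : Int) + 1 = ((k + 1 : Nat) : Int) := by push_cast; ring
    by_cases hd : PySem.Chars.strIsdigit nd[k].toList
    · simp only [hd, if_true]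
      rw [hcast, ih (k + 1) (k + 1) _ (by omega) (by omega) (by omega)]
      have hself : PySem.List.slice nd (some ((k + 1 : Nat) : Int)) (some ((k + 1 : Nat) : Int)) = [] := by
        rw [PySem.List.slice_natCast]; simp
      rw [hself]
      simp [List.append_assoc]
    · simp only [hd]
      rw [hcast, ih (k + 1) p _ (by omega) (by omega) (by omega)]
      rw [← hcast, slice_snoc nd p k hp hklt]
      simp

theorem main_nd (nd : List String) :
    (if aLoop1 nd (PySem.List.pyRange 1 nd.length 1) then (false, ([] : List String))
     else (true, aLoop2 nd (PySem.List.pyRange 0 nd.length 1) 0 []))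
      = match bGo nd [] false [] with
        | none => (false, [])
        | some r => (true, r) := by
  rw [bGo_eq]
  cases hnil : nd with
  | nil => simp [PySem.List.pyRange_one_eq_nil, badFrom, aLoop1, aLoop2, build]
  | cons t rest =>
    rw [← hnil]
    have hlen : 1 ≤ nd.length := by rw [hnil]; simp
    have h1 : aLoop1 nd (PySem.List.pyRange 1 nd.length 1)
        = badFrom (PySem.Str.strIsdigit (nd.getD 0 "")) (nd.drop 1) := by
      have := aLoop1_eq nd 1 (le_refl 1) hlen
      simpa using this
    have hbad : badFrom false nd = badFrom (PySem.Str.strIsdigit (nd.getD 0 "")) (nd.drop 1) := by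
      rw [hnil]; simp [badFrom, List.getD]
    rw [h1, ← hbad]
    by_cases hb : badFrom false nd
    · simp [hb]
    · have h2 := aLoop2_eq nd 0 0 [] (le_refl 0) (Nat.zero_le _)
      simp only [Nat.cast_zero] at h2
      have hsl : PySem.List.slice nd (some (0 : Int)) (some (0 : Int)) = [] := by
        have := PySem.List.slice_natCast (xs := nd) (a := 0) (b := 0)
        simpa using this
      rw [hsl] at h2
      simp [hb, h2]

-- ===== VERDICT (by name: the statement is the Claim_ definition above) =====
theorem check_and_list_spec : Claim_equal_check_and_list := by
  intro data _
  unfold Spec_check_and_list check_and_list check_and_list_alt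
  exact main_nd (PySem.Str.split₀ data)
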